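-- pv_equiv track=rewrite | github.com/iamoldorange666/orange-trustskill | scripts/scan_skill.py | _is_example_code
-- ===== SOURCE A (Python) =====
-- def _is_example_code(content: str, position: int) -> bool:
--     """Check if the match is in example/comment context"""
--     start = max(0, position - 200)
--     end = min(len(content), position + 200)
--     context = content[start:end].lower()
--
--     example_indicators = [
--         'example', 'danger:', 'caution:', 'warning:',
--         'bad:', 'wrong:', 'unsafe:', 'risk:', 'pattern', 'todo:'
--     ]
--     return any(indicator in context for indicator in example_indicators)
-- ===== SOURCE B (Python) =====
-- def _is_example_code(content: str, position: int) -> bool: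
--     """Check if the match is in example/comment context"""
--     start = max(0, position - 200)
--     end = min(len(content), position + 200)
--     context = content[start:end].lower()
--
--     example_indicators = [
--         'example', 'danger:', 'caution:', 'warning:',
--         'bad:', 'wrong:', 'unsafe:', 'risk:', 'pattern', 'todo:'
--     ]
--     # single left-to-right pass: at each position, does some indicator start here?
--     for i in range(len(context)):
--         for indicator in example_indicators:
--             if context.startswith(indicator, i):
--                 return True
--     return False
-- ===== Notes on version B (the rewrite author's own statement) =====
-- stated objective: alternative
-- what changed: Replaces ten independent 'indicator in context' substring scans with one position-major pass over the window that checks at each index whether any indicator starts there.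
import Mathlib
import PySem

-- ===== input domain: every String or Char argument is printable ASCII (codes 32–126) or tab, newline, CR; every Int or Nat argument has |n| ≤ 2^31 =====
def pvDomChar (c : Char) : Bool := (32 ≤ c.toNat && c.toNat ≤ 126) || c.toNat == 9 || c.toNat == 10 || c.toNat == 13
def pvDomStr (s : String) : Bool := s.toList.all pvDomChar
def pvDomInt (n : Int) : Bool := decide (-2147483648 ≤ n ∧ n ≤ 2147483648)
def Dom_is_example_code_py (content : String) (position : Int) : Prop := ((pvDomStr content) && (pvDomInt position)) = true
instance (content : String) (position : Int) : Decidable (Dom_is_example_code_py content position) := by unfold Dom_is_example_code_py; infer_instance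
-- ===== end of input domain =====

-- B: one position-major pass over the window (startswith at each index) instead of A's ten independent substring scans; same return value.
-- ===== PORT A =====
def pvIndicators : List String :=
  ["example", "danger:", "caution:", "warning:",
   "bad:", "wrong:", "unsafe:", "risk:", "pattern", "todo:"]

def is_example_code_py (content : String) (position : Int) : Bool :=
  let start := max 0 (position - 200)
  let stop := min (PySem.Str.len content) (position + 200)
  let context := PySem.Str.lower (PySem.Str.slice content (some start) (some stop))
  pvIndicators.any (fun indicator => PySem.Str.isIn indicator context)

-- ===== PORT B =====
-- the inner 'for indicator … if context.startswith(indicator, i)' at one position i (suffix cs)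
def pvScan (inds : List (List Char)) : List Char → Bool
  | [] => false
  | c :: t => inds.any (fun ind => PySem.Chars.startswith (c :: t) ind) || pvScan inds t

def is_example_code_py_alt (content : String) (position : Int) : Bool :=
  let start := max 0 (position - 200)
  let stop := min (PySem.Str.len content) (position + 200)
  let context := PySem.Str.lower (PySem.Str.slice content (some start) (some stop))
  pvScan (pvIndicators.map String.toList) context.toList

-- ===== PRECONDITION & SPEC =====
def Spec_is_example_code_py (content : String) (position : Int) (out : Bool) : Prop := out = is_example_code_py_alt content position
instance (content : String) (position : Int) (out : Bool) : Decidable (Spec_is_example_code_py content position out) := by unfold Spec_is_example_code_py; infer_instance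

-- ===== CLAIM (what is proved, stated in full; the proofs are below) =====
def Claim_equal_is_example_code_py : Prop := ∀ (content : String) (position : Int), Dom_is_example_code_py content position → Spec_is_example_code_py content position (is_example_code_py content position)

-- ===== LEMMAS AND PROOFS =====

-- ===== VERDICT (by name: the statement is the Claim_ definition above) =====
lemma pvScan_eq_any_isIn (inds : List (List Char)) (h : ∀ i ∈ inds, i ≠ []) (cs : List Char) :
    pvScan inds cs = inds.any (fun ind => PySem.Chars.isIn ind cs) := by
  induction cs with
  | nil =>
      simp only [pvScan]
      symm
      simp only [List.any_eq_false, Bool.not_eq_true, PySem.Chars.isIn_eq_false_iff]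
      intro ind hind hinf
      exact h ind hind (List.eq_nil_of_infix_nil hinf)
  | cons c t ih =>
      simp only [pvScan, ih]
      rw [Bool.eq_iff_iff]
      simp only [Bool.or_eq_true, List.any_eq_true, PySem.Chars.isIn_iff_infix,
        PySem.Chars.startswith_iff, List.infix_cons_iff]
      constructor
      · rintro (⟨i, hi, hp⟩ | ⟨i, hi, hf⟩)
        · exact ⟨i, hi, Or.inl hp⟩
        · exact ⟨i, hi, Or.inr hf⟩
      · rintro ⟨i, hi, hp | hf⟩
        · exact Or.inl ⟨i, hi, hp⟩
        · exact Or.inr ⟨i, hi, hf⟩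

theorem is_example_code_py_spec : Claim_equal_is_example_code_py := by
  intro content position _
  unfold Spec_is_example_code_py is_example_code_py is_example_code_py_alt
  rw [pvScan_eq_any_isIn _ (by decide)]
  simp [List.any_map]; rfl
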